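-- pv_equiv track=rewrite | github.com/gunturoktavianto/tubes-daspro | Bacamatriks.py | Bacamatriks
-- ===== SOURCE A (Python) =====
-- def Bacamatriks (header , baris, matriks) : # nge-return dengan header dan baris yang kita mau
--     kata = ''
--     # header itu 1,2,3 untuk username,password,role
--     cc = matriks[baris]
--     for i in range(len(cc)) :
--         if header == 1 :
--             if cc[i] == ';' :
--                 break
--             else :
--                 kata = kata + cc[i]
--         else :
--             if cc[i] == ';' :
--                 header -= 1
--     return kata
-- ===== SOURCE B (Python) =====
-- def Bacamatriks(header, baris, matriks):
--     parts = matriks[baris].split(';')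
--     if 1 <= header <= len(parts):
--         return parts[header - 1]
--     return ''
-- ===== Notes on version B (the rewrite author's own statement) =====
-- stated objective: idiomatic
-- what changed: B replaces A's character-by-character delimiter-counting state machine (mutable header countdown, accumulator, break) with a single split(';') followed by a bounds-checked index into the field list.
import Mathlib
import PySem

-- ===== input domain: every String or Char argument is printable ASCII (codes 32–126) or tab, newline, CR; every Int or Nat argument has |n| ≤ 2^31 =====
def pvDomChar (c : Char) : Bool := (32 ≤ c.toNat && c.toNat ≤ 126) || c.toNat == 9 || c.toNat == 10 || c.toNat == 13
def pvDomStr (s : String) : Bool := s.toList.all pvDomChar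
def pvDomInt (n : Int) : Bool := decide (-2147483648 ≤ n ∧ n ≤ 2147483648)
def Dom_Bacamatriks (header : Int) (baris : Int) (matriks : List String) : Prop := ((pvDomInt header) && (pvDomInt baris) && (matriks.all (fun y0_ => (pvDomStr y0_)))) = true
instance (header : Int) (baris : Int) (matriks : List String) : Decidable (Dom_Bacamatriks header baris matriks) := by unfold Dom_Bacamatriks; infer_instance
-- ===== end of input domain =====

-- B replaces A's delimiter-counting character state machine with tokenize-then-index: split the row
-- on ';' once and return the (header-1)-th field when it exists, '' otherwise (objective: idiomatic).

-- ===== PORT A =====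
-- A's for-loop over the characters of cc, with the mutable state (header, kata) and the break at ';'
def pvLoopA : List Char → Int → List Char → List Char
  | [], _, kata => kata
  | c :: rest, header, kata =>
    if header = 1 then
      if c = ';' then kata             -- break
      else pvLoopA rest header (kata ++ [c])
    else
      if c = ';' then pvLoopA rest (header - 1) kata
      else pvLoopA rest header kata

def Bacamatriks (header : Int) (baris : Int) (matriks : List String) : String :=
  match PySem.List.pyGet? matriks baris with
  | none => ""                          -- IndexError: excluded by Pre_
  | some cc => String.ofList (pvLoopA cc.toList header [])

-- ===== PORT B =====
def Bacamatriks_alt (header : Int) (baris : Int) (matriks : List String) : String :=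
  match PySem.List.pyGet? matriks baris with
  | none => ""                          -- IndexError: excluded by Pre_
  | some row =>
    let parts : List String := (PySem.Chars.splitOn row.toList [';']).map String.ofList
    if 1 ≤ header ∧ header ≤ parts.length then
      (PySem.List.pyGet? parts (header - 1)).getD ""
    else ""

-- ===== PRECONDITION & SPEC =====
-- Pre_ excludes exactly the inputs where matriks[baris] raises IndexError in A (and in B).
def Pre_Bacamatriks (header : Int) (baris : Int) (matriks : List String) : Prop :=
  PySem.Raise.InRange matriks.length baris
instance (header : Int) (baris : Int) (matriks : List String) : Decidable (Pre_Bacamatriks header baris matriks) := by unfold Pre_Bacamatriks; infer_instance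

def pvWitness_Bacamatriks : Int × Int × List String := (2, 0, ["user;pass;role"])

def Spec_Bacamatriks (header : Int) (baris : Int) (matriks : List String) (out : String) : Prop := out = Bacamatriks_alt header baris matriks
instance (header : Int) (baris : Int) (matriks : List String) (out : String) : Decidable (Spec_Bacamatriks header baris matriks out) := by unfold Spec_Bacamatriks; infer_instance

-- ===== CLAIM (what is proved, stated in full; the proofs are below) =====
def Claim_equal_Bacamatriks : Prop := ∀ (header : Int) (baris : Int) (matriks : List String), Dom_Bacamatriks header baris matriks → Pre_Bacamatriks header baris matriks → Spec_Bacamatriks header baris matriks (Bacamatriks header baris matriks)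

-- ===== LEMMAS AND PROOFS =====

-- a simple recursive characterisation of splitting on ';'
def pvMapHead (f : List Char → List Char) : List (List Char) → List (List Char)
  | [] => []
  | x :: xs => f x :: xs

def pvFields : List Char → List (List Char)
  | [] => [[]]
  | c :: rest => if c = ';' then [] :: pvFields rest else pvMapHead (c :: ·) (pvFields rest)

lemma pvFields_ne_nil (l : List Char) : pvFields l ≠ [] := by
  cases l with
  | nil => simp [pvFields]
  | cons c rest =>
    simp only [pvFields]
    split
    · simp
    · cases h : pvFields rest with
      | nil => exact absurd h (pvFields_ne_nil rest)
      | cons x xs => simp [pvMapHead]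

lemma pvMapHead_comp (f g : List Char → List Char) (l : List (List Char)) :
    pvMapHead f (pvMapHead g l) = pvMapHead (f ∘ g) l := by
  cases l <;> simp [pvMapHead]

lemma pv_splitOn_go (fuel : Nat) : ∀ (l cur : List Char) (acc : List (List Char)),
    l.length ≤ fuel →
    PySem.Chars.splitOn.go [';'] fuel l cur acc
      = acc.reverse ++ pvMapHead (cur.reverse ++ ·) (pvFields l) := by
  induction fuel with
  | zero =>
    intro l cur acc h
    have : l = [] := List.eq_nil_of_length_eq_zero (Nat.le_zero.mp h)
    subst this
    simp [PySem.Chars.splitOn.go, pvFields, pvMapHead]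
  | succ n ih =>
    intro l cur acc h
    cases l with
    | nil => simp [PySem.Chars.splitOn.go, pvFields, pvMapHead]
    | cons c rest =>
      by_cases hc : c = ';'
      · subst hc
        rw [show PySem.Chars.splitOn.go [';'] (n+1) (';' :: rest) cur acc
              = PySem.Chars.splitOn.go [';'] n rest [] (cur.reverse :: acc) from by
            simp [PySem.Chars.splitOn.go, List.isPrefixOf]]
        rw [ih rest [] _ (by simpa using Nat.lt_succ_iff.mp (by simpa using h))]
        simp only [pvFields, pvMapHead, List.reverse_cons, List.append_assoc,
          List.reverse_nil, List.nil_append, List.singleton_append]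
        congr 1
        cases pvFields rest <;> simp
      · rw [show PySem.Chars.splitOn.go [';'] (n+1) (c :: rest) cur acc
              = PySem.Chars.splitOn.go [';'] n rest (c :: cur) acc from by
            simp only [PySem.Chars.splitOn.go, List.isPrefixOf, Bool.and_eq_true, beq_iff_eq]
            rw [if_neg (by simp [Ne.symm hc])]]
        rw [ih rest (c :: cur) _ (by simpa using Nat.lt_succ_iff.mp (by simpa using h))]
        simp only [pvFields, if_neg hc, pvMapHead_comp, List.reverse_cons]
        congr 1
        cases hf : pvFields rest with
        | nil => exact absurd hf (pvFields_ne_nil rest)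
        | cons x xs => simp [pvMapHead]

lemma pv_splitOn_eq_fields (l : List Char) :
    PySem.Chars.splitOn l [';'] = pvFields l := by
  rw [PySem.Chars.splitOn, pv_splitOn_go (l.length + 1) l [] [] (by omega)]
  cases hf : pvFields l with
  | nil => exact absurd hf (pvFields_ne_nil l)
  | cons x xs => simp [pvMapHead]

lemma pvLoopA_spec (l : List Char) : ∀ (header : Int) (kata : List Char),
    pvLoopA l header kata
      = kata ++ (if 1 ≤ header then (pvFields l).getD (header - 1).toNat [] else []) := by
  induction l with
  | nil =>
    intro header kata
    by_cases h1 : (1:Int) ≤ header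
    · rcases eq_or_lt_of_le h1 with h | h
      · simp [pvLoopA, pvFields, ← h]
      · simp [pvLoopA, pvFields, h1, List.getD]
    · simp [pvLoopA, h1]
  | cons c rest ih =>
    intro header kata
    by_cases h1 : header = 1
    · subst h1
      by_cases hc : c = ';'
      · simp [pvLoopA, hc, pvFields]
      · rw [show pvLoopA (c :: rest) 1 kata = pvLoopA rest 1 (kata ++ [c]) from by
            simp [pvLoopA, hc]]
        rw [ih]
        simp only [pvFields, if_neg hc]
        cases hf : pvFields rest with
        | nil => exact absurd hf (pvFields_ne_nil rest)
        | cons x xs => simp [pvMapHead]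
    · by_cases hc : c = ';'
      · subst hc
        rw [show pvLoopA (';' :: rest) header kata = pvLoopA rest (header - 1) kata from by
            simp [pvLoopA, h1]]
        rw [ih]
        by_cases h2 : (1:Int) ≤ header
        · have hgt : (2:Int) ≤ header := by omega
          have : (1:Int) ≤ header - 1 := by omega
          simp only [pvFields, if_pos this, if_pos h2]
          congr 1
          have hn : (header - 1).toNat = (header - 1 - 1).toNat + 1 := by omega
          rw [hn]
          simp [List.getD, List.getElem?_cons_succ]
        · have : ¬ (1:Int) ≤ header - 1 := by omega
          simp [this, h2]
      · rw [show pvLoopA (c :: rest) header kata = pvLoopA rest header kata from by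
            simp [pvLoopA, h1, hc]]
        rw [ih]
        by_cases h2 : (1:Int) ≤ header
        · have hgt : (2:Int) ≤ header := by
            rcases lt_or_eq_of_le h2 with h | h
            · omega
            · exact absurd h.symm h1
          simp only [pvFields, if_neg hc, if_pos h2]
          congr 1
          have hidx : 1 ≤ (header - 1).toNat := by omega
          cases hf : pvFields rest with
          | nil => exact absurd hf (pvFields_ne_nil rest)
          | cons x xs =>
            obtain ⟨k, hk⟩ : ∃ k, (header - 1).toNat = k + 1 := ⟨(header-1).toNat - 1, by omega⟩
            simp [pvMapHead, hk, List.getD]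
        · simp [h2]

-- ===== VERDICT (by name: the statement is the Claim_ definition above) =====
theorem Bacamatriks_spec : Claim_equal_Bacamatriks := by
  intro header baris matriks _ hpre
  unfold Spec_Bacamatriks Bacamatriks Bacamatriks_alt
  obtain ⟨cc, hcc⟩ : ∃ cc, PySem.List.pyGet? matriks baris = some cc := by
    cases h : PySem.List.pyGet? matriks baris with
    | none => exact absurd (((PySem.List.pyGet?_eq_none_iff _ _).mp h)) (not_not_intro hpre)
    | some cc => exact ⟨cc, rfl⟩
  rw [hcc]
  simp only [pv_splitOn_eq_fields, pvLoopA_spec]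
  set fs := pvFields cc.toList with hfs
  by_cases h1 : (1:Int) ≤ header
  · by_cases h2 : header ≤ (fs.map String.ofList).length
    · simp only [if_pos h1, if_pos (And.intro h1 h2), List.nil_append]
      have hlen : (header - 1).toNat < fs.length := by
        simp at h2; omega
      rw [PySem.List.pyGet?_of_nonneg (List.map String.ofList fs) (show (0:Int) ≤ header - 1 by omega)]
      simp [List.getD, List.getElem?_map]
    · have hlen : fs.length ≤ (header - 1).toNat := by
        simp at h2
        simp; omega
      simp only [if_pos h1, List.nil_append]
      rw [if_neg (by intro hb; exact h2 hb.2)]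
      have hlen' : fs.length ≤ header.toNat - 1 := by omega
      simp [List.getD, List.getElem?_eq_none hlen']
  · rw [if_neg h1, if_neg (by intro hb; exact h1 hb.1)]
    rfl
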